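-- pv_equiv track=rewrite | github.com/noemiernst/StackExchangeMathDataset | processing_dump/formula_processing.py | formula_extr
-- ===== SOURCE A (Python) =====
-- def formula_extr(text):
--     formulas = []
--
--     error = False
--
--     if text.find('$') > -1:
--         _,found,after = text.partition('$')
--         while found:
--             if text.find('$') > -1:
--                 formula,found,after = after.partition('$')
--
--                 if(formula.endswith('\\')):
--                     formula_temp,found_temp,after = after.partition('$')
--                     formula = formula + found + formula_temp
--                 if formula != '':
--                     if found:
--                         formulas.append(formula)
--                     else:
--                         error = True
--
--                     _,found,after = after.partition('$')
--                 else: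
--                     formula,found,after = after.partition('$$')
--                     if formula != '':
--                         if found:
--                             formulas.append(formula)
--                         else:
--                             after = formula
--                             error = True
--
--                     _,found,after = after.partition('$')
--
--             if error:
--                 break
--     return formulas, error
-- ===== SOURCE B (Python) =====
-- def formula_extr(text):
--     formulas = []
--     p = text.find('$')
--     while p != -1:
--         p += 1                              # character after the opening '$'
--         j = text.find('$', p)
--         if j == p:
--             # '$$': display formula, delimited by the next '$$'
--             k = text.find('$$', p + 1)
--             if k == -1:
--                 if p + 1 < len(text):
--                     return formulas, True
--                 break
--             if k > p + 1:
--                 formulas.append(text[p + 1:k])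
--             p = text.find('$', k + 2)
--         elif j == -1:
--             if p < len(text):
--                 return formulas, True
--             break
--         else:
--             if text[j - 1] == '\\':
--                 # escaped '$' inside the formula: extend to the following '$'
--                 j = text.find('$', j + 1)
--             formulas.append(text[p:j] if j != -1 else text[p:])
--             p = text.find('$', j + 1) if j != -1 else -1
--     return formulas, False
-- ===== Notes on version B (the rewrite author's own statement) =====
-- stated objective: faster
-- what changed: A repeatedly calls str.partition, copying the remaining tail of the text at every step; B keeps a single integer cursor and advances it with text.find(sub, start) plus slicing only the extracted formulas, turning the quadratic tail-copying (on formula-dense text) into a linear scan.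
import Mathlib
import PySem

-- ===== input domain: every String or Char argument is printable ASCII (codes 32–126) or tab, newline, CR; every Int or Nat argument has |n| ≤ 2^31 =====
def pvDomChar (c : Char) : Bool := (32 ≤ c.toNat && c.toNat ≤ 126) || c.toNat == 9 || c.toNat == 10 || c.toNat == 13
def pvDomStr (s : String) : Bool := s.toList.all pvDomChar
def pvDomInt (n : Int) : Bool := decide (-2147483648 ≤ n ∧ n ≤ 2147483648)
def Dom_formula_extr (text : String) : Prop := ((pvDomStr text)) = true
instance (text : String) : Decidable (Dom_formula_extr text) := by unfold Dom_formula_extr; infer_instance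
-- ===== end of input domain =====

-- B replaces A's repeated str.partition (which re-copies the remaining tail at every '$') by a
-- single integer cursor advanced with text.find(sub, start): same return value without the
-- quadratic tail copying (linear in the text plus the extracted formulas).


-- ===== PORT A =====
-- str.partition(sep): hand-ported (PySem has no partition); exact for nonempty sep:
-- (before, sep, after) at the first occurrence, or (s, '', '') when sep is absent.
def pvPartition (s sep : List Char) : List Char × List Char × List Char :=
  let i := PySem.Chars.find s sep
  if i = -1 then (s, [], []) else (s.take i.toNat, sep, s.drop (i.toNat + sep.length))

-- A's while-loop; fuel is only a totality guard (each continuing iteration strictly shrinks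
-- `after`, and formula_extr passes fuel > after.length, so fuel never runs out there).
def pvALoop (t : List Char) : Nat → List String → List Char → List Char → List String × Bool
  | 0, formulas, _, _ => (formulas, false)
  | fuel + 1, formulas, found, after =>
    if found = [] then (formulas, false)
    else if -1 < PySem.Chars.find t ['$'] then
      match pvPartition after ['$'] with
      | (formula₀, found₁, after₁) =>
        let fa : List Char × List Char :=
          if PySem.Chars.endswith formula₀ ['\\'] then
            match pvPartition after₁ ['$'] with
            | (ft, _, a2) => (formula₀ ++ found₁ ++ ft, a2)
          else (formula₀, after₁)
        let formula := fa.1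
        let after₂ := fa.2
        if formula ≠ [] then
          if found₁ ≠ [] then
            match pvPartition after₂ ['$'] with
            | (_, found', after') => pvALoop t fuel (formulas ++ [String.ofList formula]) found' after'
          else (formulas, true)
        else
          match pvPartition after₂ ['$', '$'] with
          | (f2, fd2, a3) =>
            if f2 ≠ [] then
              if fd2 ≠ [] then
                match pvPartition a3 ['$'] with
                | (_, found', after') => pvALoop t fuel (formulas ++ [String.ofList f2]) found' after'
              else (formulas, true)
            else
              match pvPartition a3 ['$'] with
              | (_, found', after') => pvALoop t fuel formulas found' after'
    else pvALoop t fuel formulas found after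

def formula_extr (text : String) : List String × Bool :=
  let t := text.toList
  if -1 < PySem.Chars.find t ['$'] then
    match pvPartition t ['$'] with
    | (_, found, after) => pvALoop t (t.length + 1) [] found after
  else ([], false)

-- ===== PORT B =====
-- B's while-loop over the cursor p; fuel is only a totality guard (the cursor strictly
-- increases and is bounded by the length, so fuel = length + 1 never runs out).
def pvBLoop (t : List Char) : Nat → List String → Int → List String × Bool
  | 0, formulas, _ => (formulas, false)
  | fuel + 1, formulas, p₀ =>
    if p₀ = -1 then (formulas, false)
    else
      let p := p₀ + 1
      let j := PySem.Chars.findFrom t ['$'] p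
      if j = p then
        let k := PySem.Chars.findFrom t ['$', '$'] (p + 1)
        if k = -1 then
          if p + 1 < (t.length : Int) then (formulas, true) else (formulas, false)
        else
          let formulas' := if p + 1 < k then formulas ++ [String.ofList (PySem.List.slice t (some (p + 1)) (some k))] else formulas
          pvBLoop t fuel formulas' (PySem.Chars.findFrom t ['$'] (k + 2))
      else if j = -1 then
        if p < (t.length : Int) then (formulas, true) else (formulas, false)
      else
        let j' := if PySem.List.pyGet? t (j - 1) = some '\\' then PySem.Chars.findFrom t ['$'] (j + 1) else j
        let formulas' := formulas ++ [String.ofList (if j' ≠ -1 then PySem.List.slice t (some p) (some j') else PySem.List.slice t (some p) none)]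
        pvBLoop t fuel formulas' (if j' ≠ -1 then PySem.Chars.findFrom t ['$'] (j' + 1) else -1)

def formula_extr_alt (text : String) : List String × Bool :=
  let t := text.toList
  pvBLoop t (t.length + 1) [] (PySem.Chars.find t ['$'])

-- ===== PRECONDITION & SPEC =====
def Spec_formula_extr (text : String) (out : List String × Bool) : Prop := out = formula_extr_alt text
instance (text : String) (out : List String × Bool) : Decidable (Spec_formula_extr text out) := by unfold Spec_formula_extr; infer_instance

-- ===== CLAIM (what is proved, stated in full; the proofs are below) =====
def Claim_equal_formula_extr : Prop := ∀ (text : String), Dom_formula_extr text → Spec_formula_extr text (formula_extr text)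

-- ===== LEMMAS AND PROOFS =====

lemma pvALoop_found_nil (t : List Char) (fuel : Nat) (f : List String) (after : List Char) :
    pvALoop t fuel f [] after = (f, false) := by
  cases fuel <;> simp [pvALoop]

lemma pvBLoop_neg_one (t : List Char) (fuel : Nat) (f : List String) :
    pvBLoop t fuel f (-1) = (f, false) := by
  cases fuel <;> simp [pvBLoop]

lemma pvPartition_neg {s sep : List Char} (h : PySem.Chars.find s sep = -1) :
    pvPartition s sep = (s, [], []) := by
  simp [pvPartition, h]

lemma pvPartition_pos {s sep : List Char} {n : Nat} (h : PySem.Chars.find s sep = (n : Int)) :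
    pvPartition s sep = (s.take n, sep, s.drop (n + sep.length)) := by
  simp [pvPartition, h]

lemma pvFind_nil {sep : List Char} (h : sep ≠ []) : PySem.Chars.find [] sep = -1 := by
  rw [PySem.Chars.find_eq_neg_one_iff]
  simpa using h

lemma pvDollarAt {t : List Char} {q : Nat} (h : ['$'] <+: t.drop q) :
    t.drop q = '$' :: t.drop (q + 1) ∧ q < t.length := by
  obtain ⟨r, hr⟩ := h
  have hlen : t.length - q = r.length + 1 := by
    have := congrArg List.length hr
    simpa using this.symm
  have hq : q < t.length := by omega
  have hrd : r = t.drop (q + 1) := by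
    have : t.drop (q + 1) = (t.drop q).drop 1 := by
      rw [List.drop_drop]
    rw [this, ← hr]
    simp
  constructor
  · rw [← hr, hrd]; simp
  · exact hq

lemma pvEndswith_take {l : List Char} {n : Nat} (hn : 1 ≤ n) (hl : n ≤ l.length) (c : Char) :
    PySem.Chars.endswith (l.take n) [c] = (l[n-1]? == some c) := by
  have hgl : (l.take n).getLast? = l[n-1]? := by
    rw [List.getLast?_eq_getElem?, List.getElem?_take]
    simp only [List.length_take]
    rw [if_pos (by omega)]
    congr 1
    omega
  have hiff : PySem.Chars.endswith (l.take n) [c] = true ↔ l[n-1]? = some c := by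
    rw [PySem.Chars.endswith_iff]
    constructor
    · rintro ⟨pre, hpre⟩
      rw [← hgl, ← hpre]
      simp
    · intro hsome
      rw [← hgl] at hsome
      obtain ⟨l', hl'⟩ := List.getLast?_eq_some_iff.mp hsome
      exact ⟨l', hl'.symm⟩
  cases hb : (l[n-1]? == some c) with
  | true => exact hiff.mpr (by simpa using hb)
  | false =>
    by_contra hne
    have : PySem.Chars.endswith (l.take n) [c] = true := by
      cases hE : PySem.Chars.endswith (l.take n) [c] <;> simp_all
    simp [hiff.mp this] at hb

-- one trailing "…partition('$')" step of A equals B's "p = text.find('$', q)" recursion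
lemma pvStep (t : List Char) (fuel : Nat)
    (IH : ∀ (p : Nat) (F : List String), ['$'] <+: t.drop p →
      pvALoop t fuel F ['$'] (t.drop (p + 1)) = pvBLoop t fuel F (p : Int))
    (q : Nat) (hq : q ≤ t.length) (F : List String) :
    pvALoop t fuel F (pvPartition (t.drop q) ['$']).2.1 (pvPartition (t.drop q) ['$']).2.2
      = pvBLoop t fuel F (PySem.Chars.findFrom t ['$'] (q : Int)) := by
  rw [PySem.Chars.findFrom_natCast t ['$'] q hq]
  by_cases hi : PySem.Chars.find (t.drop q) ['$'] = -1
  · rw [if_pos hi, pvPartition_neg hi, pvBLoop_neg_one]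
    exact pvALoop_found_nil t fuel F []
  · have hge : 0 ≤ PySem.Chars.find (t.drop q) ['$'] := by
      have := PySem.Chars.neg_one_le_find (t.drop q) ['$']; omega
    set n := (PySem.Chars.find (t.drop q) ['$']).toNat with hn
    have hfind : PySem.Chars.find (t.drop q) ['$'] = (n : Int) := by omega
    obtain ⟨hpre, -⟩ := PySem.Chars.find_spec hge
    rw [List.drop_drop] at hpre
    rw [if_neg hi, pvPartition_pos hfind, hfind]
    have : ((q : Int) + (n : Int)) = ((q + n : Nat) : Int) := by push_cast; ring
    rw [this]
    have hA : (t.drop q).drop (n + ['$'].length) = t.drop ((q + n) + 1) := by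
      rw [List.drop_drop]
      congr 1
    simpa [hA] using IH (q + n) F hpre

set_option maxRecDepth 10000 in
lemma pvLoop_eq (t : List Char) (ht : -1 < PySem.Chars.find t ['$']) :
    ∀ (fuel : Nat) (p : Nat) (formulas : List String), ['$'] <+: t.drop p →
      pvALoop t fuel formulas ['$'] (t.drop (p + 1)) = pvBLoop t fuel formulas (p : Int) := by
  intro fuel
  induction fuel with
  | zero => intro p formulas _; simp [pvALoop, pvBLoop]
  | succ fuel IH =>
    intro p formulas hp
    obtain ⟨hcons, hplen⟩ := pvDollarAt hp
    have hp1 : ((p : Int) + 1) = ((p + 1 : Nat) : Int) := by push_cast; ring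
    have hff : PySem.Chars.findFrom t ['$'] ((p + 1 : Nat) : Int) none
        = if PySem.Chars.find (t.drop (p + 1)) ['$'] = -1 then -1
          else ((p + 1 : Nat) : Int) + PySem.Chars.find (t.drop (p + 1)) ['$'] :=
      PySem.Chars.findFrom_natCast t ['$'] (p + 1) (by omega)
    have hnil1 : PySem.Chars.find ([] : List Char) ['$'] = -1 := pvFind_nil (by simp)
    have hnil2 : PySem.Chars.find ([] : List Char) ['$', '$'] = -1 := pvFind_nil (by simp)
    have hpnil1 : pvPartition [] ['$'] = ([], [], []) := pvPartition_neg hnil1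
    have hpnil2 : pvPartition [] ['$', '$'] = ([], [], []) := pvPartition_neg hnil2
    simp only [pvALoop, pvBLoop]
    rw [if_neg (show ¬((p : Int) = -1) by omega)]
    rw [if_neg (show ¬(['$'] : List Char) = [] by simp)]
    rw [if_pos ht]
    simp only [hp1, hff]
    by_cases hi : PySem.Chars.find (t.drop (p + 1)) ['$'] = -1
    · -- no further '$' after the opening one
      rw [pvPartition_neg hi]
      simp only [if_pos hi]
      rw [if_neg (show ¬((-1 : Int) = ((p + 1 : Nat) : Int)) by omega)]
      simp only [if_true]
      by_cases hafter : t.drop (p + 1) = []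
      · have hlen2 : t.length ≤ p + 1 := List.drop_eq_nil_iff.mp hafter
        rw [if_neg (show ¬(((p + 1 : Nat) : Int) < (t.length : Int)) by push_cast; omega)]
        by_cases he : PySem.Chars.endswith (t.drop (p + 1)) ['\\'] = true
        · simp [hafter, pvPartition_neg, hnil1, hnil2, pvALoop_found_nil]
        · simp [hafter, pvPartition_neg, hnil1, hnil2, pvALoop_found_nil]
      · have hlen2 : p + 1 < t.length := by
          by_contra hc
          exact hafter (List.drop_eq_nil_iff.mpr (by omega))
        rw [if_pos (show (((p + 1 : Nat) : Int) < (t.length : Int)) by push_cast; omega)]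
        by_cases he : PySem.Chars.endswith (t.drop (p + 1)) ['\\'] = true
        · simp [he, hafter, pvPartition_neg, hnil1]
        · simp [he, hafter]
    · -- there is a next '$', at relative position n in t.drop (p+1)
      have hge : 0 ≤ PySem.Chars.find (t.drop (p + 1)) ['$'] := by
        have := PySem.Chars.neg_one_le_find (t.drop (p + 1)) ['$']; omega
      set n := (PySem.Chars.find (t.drop (p + 1)) ['$']).toNat with hn
      have hfind : PySem.Chars.find (t.drop (p + 1)) ['$'] = (n : Int) := by omega
      obtain ⟨hpre2, -⟩ := PySem.Chars.find_spec hge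
      rw [List.drop_drop] at hpre2
      obtain ⟨hcons2, hlen2⟩ := pvDollarAt hpre2
      rw [pvPartition_pos hfind]
      have hnneg : ¬(((n : Nat) : Int) = -1) := by omega
      simp only [hfind, if_neg hnneg]
      have hcast : (((p + 1 : Nat) : Int) + (n : Int)) = ((p + 1 + n : Nat) : Int) := by
        push_cast; ring
      rw [hcast]
      by_cases hn0 : n = 0
      · -- '$$' : empty inline formula, switch to display-formula scan
        rw [hn0]
        simp only [Nat.add_zero, if_true]
        have hp2 : ((p + 1 + 1 : Nat) : Int) = ((p + 1 : Nat) : Int) + 1 := by push_cast; ring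
        have hffdd : PySem.Chars.findFrom t ['$', '$'] ((p + 1 + 1 : Nat) : Int) none
            = if PySem.Chars.find (t.drop (p + 1 + 1)) ['$', '$'] = -1 then -1
              else ((p + 1 + 1 : Nat) : Int) + PySem.Chars.find (t.drop (p + 1 + 1)) ['$', '$'] :=
          PySem.Chars.findFrom_natCast t ['$', '$'] (p + 1 + 1) (by omega)
        rw [← hp2, hffdd]
        have hA1 : (t.drop (p + 1)).drop (0 + ['$'].length) = t.drop (p + 1 + 1) := by
          rw [List.drop_drop]
          norm_num
        have hesw : PySem.Chars.endswith ([] : List Char) ['\\'] = false := by decide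
        by_cases hm : PySem.Chars.find (t.drop (p + 1 + 1)) ['$', '$'] = -1
        · rw [if_pos hm]
          by_cases h2 : t.drop (p + 1 + 1) = []
          · have : t.length ≤ p + 1 + 1 := List.drop_eq_nil_iff.mp h2
            rw [if_neg (show ¬(((p + 1 + 1 : Nat) : Int) < (t.length : Int)) by push_cast; omega)]
            simp [hesw, h2, hpnil1, hpnil2, pvALoop_found_nil]
          · have : p + 1 + 1 < t.length := by
              by_contra hc
              exact h2 (List.drop_eq_nil_iff.mpr (by omega))
            rw [if_pos (show (((p + 1 + 1 : Nat) : Int) < (t.length : Int)) by push_cast; omega)]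
            simp [hesw, pvPartition_neg, hm, h2]
        · rw [if_neg hm]
          have hmge : 0 ≤ PySem.Chars.find (t.drop (p + 1 + 1)) ['$', '$'] := by
            have := PySem.Chars.neg_one_le_find (t.drop (p + 1 + 1)) ['$', '$']; omega
          set m := (PySem.Chars.find (t.drop (p + 1 + 1)) ['$', '$']).toNat with hmdef
          have hmfind : PySem.Chars.find (t.drop (p + 1 + 1)) ['$', '$'] = (m : Int) := by omega
          obtain ⟨hpredd, -⟩ := PySem.Chars.find_spec hmge
          rw [List.drop_drop] at hpredd
          obtain ⟨rdd, hrdd⟩ := hpredd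
          have hddlen : p + 1 + 1 + m + 2 ≤ t.length := by
            have := congrArg List.length hrdd
            simp [List.length_drop] at this
            omega
          have hcast2 : (((p + 1 + 1 : Nat) : Int) + (m : Int)) = ((p + 1 + 1 + m : Nat) : Int) := by
            push_cast; ring
          rw [hmfind, hcast2]
          have hslice : PySem.List.slice t (some ((p + 1 + 1 : Nat) : Int)) (some ((p + 1 + 1 + m : Nat) : Int))
              = (t.drop (p + 1 + 1)).take m := by
            rw [PySem.List.slice_natCast]
            congr 1
            omega
          have hcast3 : (((p + 1 + 1 + m : Nat) : Int) + 2) = ((p + 1 + 1 + m + 2 : Nat) : Int) := by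
            push_cast; ring
          have hA2 : (t.drop (p + 1 + 1)).drop (m + ['$', '$'].length) = t.drop (p + 1 + 1 + m + 2) := by
            rw [List.drop_drop]
            congr 1
          have hstep := pvStep t fuel IH (p + 1 + 1 + m + 2) (by omega)
          by_cases hm0 : m = 0
          · rw [if_neg (show ¬(((p + 1 + 1 : Nat) : Int) < ((p + 1 + 1 + m : Nat) : Int)) by push_cast; omega)]
            simp only [hcast3]
            simpa [hesw, hA1, pvPartition_pos hmfind, hm0, hA2] using hstep formulas
          · rw [if_pos (show (((p + 1 + 1 : Nat) : Int) < ((p + 1 + 1 + m : Nat) : Int)) by push_cast; omega)]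
            have hf2ne : (t.drop (p + 1 + 1)).take m ≠ [] := by
              have hlen : ((t.drop (p + 1 + 1)).take m).length = m := by
                simp [List.length_take, List.length_drop]
                omega
              intro hcon
              rw [hcon] at hlen
              simp at hlen
              omega
            simp only [hcast3, hslice]
            simpa [hesw, hA1, pvPartition_pos hmfind, hf2ne, hA2]
              using hstep (formulas ++ [String.ofList ((t.drop (p + 1 + 1)).take m)])
      · -- a nonempty inline formula ending at position p+1+n
        rw [if_neg (show ¬(((p + 1 + n : Nat) : Int) = ((p + 1 : Nat) : Int)) by omega)]
        rw [if_neg (show ¬(((p + 1 + n : Nat) : Int) = -1) by omega)]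
        have hnle : n ≤ (t.drop (p + 1)).length := by
          simp [List.length_drop]
          omega
        have htake_ne : (t.drop (p + 1)).take n ≠ [] := by
          have hlen : ((t.drop (p + 1)).take n).length = n := by
            simp [List.length_take, List.length_drop]
            omega
          intro hcon
          rw [hcon] at hlen
          simp at hlen
          omega
        have hidx : p + 1 + (n + 1) = p + 1 + n + 1 := by omega
        have hesw : PySem.Chars.endswith ((t.drop (p + 1)).take n) ['\\']
            = (t[p + n]? == some '\\') := by
          rw [pvEndswith_take (by omega) hnle]
          congr 1
          rw [List.getElem?_drop]
          congr 1
          omega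
        have hget : PySem.List.pyGet? t (((p + 1 + n : Nat) : Int) - 1) = t[p + n]? := by
          rw [show (((p + 1 + n : Nat) : Int) - 1) = ((p + n : Nat) : Int) by push_cast; ring]
          exact PySem.List.pyGet?_natCast t (p + n)
        rw [hget]
        by_cases hesc : t[p + n]? = some '\\'
        · -- escaped '$': merge with the next segment
          rw [if_pos hesc]
          have hffn : PySem.Chars.findFrom t ['$'] (((p + 1 + n : Nat) : Int) + 1) none
              = if PySem.Chars.find (t.drop (p + 1 + n + 1)) ['$'] = -1 then -1
                else ((p + 1 + n + 1 : Nat) : Int) + PySem.Chars.find (t.drop (p + 1 + n + 1)) ['$'] := by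
            rw [show (((p + 1 + n : Nat) : Int) + 1) = ((p + 1 + n + 1 : Nat) : Int) by push_cast; ring]
            exact PySem.Chars.findFrom_natCast t ['$'] (p + 1 + n + 1) (by omega)
          rw [hffn]
          have hsplit : t.drop (p + 1) = (t.drop (p + 1)).take n ++ '$' :: t.drop (p + 1 + n + 1) := by
            conv_lhs => rw [← List.take_append_drop n (t.drop (p + 1))]
            congr 1
            rw [List.drop_drop]
            exact hcons2
          by_cases hi2 : PySem.Chars.find (t.drop (p + 1 + n + 1)) ['$'] = -1
          · rw [if_pos hi2]
            have hslice : PySem.List.slice t (some ((p + 1 : Nat) : Int)) none = t.drop (p + 1) :=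
              PySem.List.slice_from_natCast t (p + 1)
            have hstr : String.ofList ((t.drop (p + 1)).take n) ++ String.ofList ('$' :: t.drop (p + 1 + n + 1))
                = String.ofList (t.drop (p + 1)) := by
              conv_rhs => rw [hsplit]
              simp
            simp [hesw, hesc, pvPartition_neg hi2, hidx, htake_ne, hpnil1,
                  pvALoop_found_nil, pvBLoop_neg_one]
            rw [hstr, show ((p : Int) + 1) = ((p + 1 : Nat) : Int) by push_cast; ring,
                PySem.List.slice_from_natCast]
          · have hi2ge : 0 ≤ PySem.Chars.find (t.drop (p + 1 + n + 1)) ['$'] := by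
              have := PySem.Chars.neg_one_le_find (t.drop (p + 1 + n + 1)) ['$']; omega
            set m2 := (PySem.Chars.find (t.drop (p + 1 + n + 1)) ['$']).toNat with hm2def
            have hm2find : PySem.Chars.find (t.drop (p + 1 + n + 1)) ['$'] = (m2 : Int) := by omega
            obtain ⟨hprei2, -⟩ := PySem.Chars.find_spec hi2ge
            rw [List.drop_drop] at hprei2
            obtain ⟨hcons3, hlen3⟩ := pvDollarAt hprei2
            rw [if_neg hi2, hm2find]
            have hcast4 : (((p + 1 + n + 1 : Nat) : Int) + (m2 : Int)) = ((p + 1 + n + 1 + m2 : Nat) : Int) := by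
              push_cast; ring
            rw [hcast4]
            have hj2 : ((p + 1 + n + 1 + m2 : Nat) : Int) ≠ -1 := by omega
            have hslice2 : PySem.List.slice t (some ((p + 1 : Nat) : Int)) (some ((p + 1 + n + 1 + m2 : Nat) : Int))
                = (t.drop (p + 1)).take (n + (1 + m2)) := by
              rw [PySem.List.slice_natCast]
              congr 1
              omega
            have hdropn : (t.drop (p + 1)).drop n = '$' :: t.drop (p + 1 + n + 1) := by
              rw [List.drop_drop]
              exact hcons2
            have htakeadd : (t.drop (p + 1)).take (n + (1 + m2))
                = (t.drop (p + 1)).take n ++ '$' :: (t.drop (p + 1 + n + 1)).take m2 := by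
              rw [List.take_add, hdropn]
              congr 1
              rw [show 1 + m2 = m2 + 1 by omega, List.take_succ_cons]
            have hidx2 : p + 1 + n + 1 + (m2 + 1) = p + 1 + n + 1 + m2 + 1 := by omega
            have hA3 : (t.drop (p + 1 + n + 1)).drop (m2 + ['$'].length) = t.drop (p + 1 + n + 1 + m2 + 1) := by
              rw [List.drop_drop]
              congr 1
            have hcast6 : (((p + 1 + n + 1 + m2 : Nat) : Int) + 1) = ((p + 1 + n + 1 + m2 + 1 : Nat) : Int) := by
              push_cast; ring
            have hstep := pvStep t fuel IH (p + 1 + n + 1 + m2 + 1) (by omega)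
            have hfne : (t.drop (p + 1)).take n ++ ['$'] ++ (t.drop (p + 1 + n + 1)).take m2 ≠ [] := by
              simp
            simp only [hcast6, hslice2, htakeadd]
            simpa [hesw, hesc, pvPartition_pos hm2find, hidx, hidx2, hA3, hfne,
                   (show ¬((p : Int) + 1 + (n : Int) + 1 + (m2 : Int) = -1) by omega)]
              using hstep (formulas ++ [String.ofList ((t.drop (p + 1)).take n ++ '$' :: (t.drop (p + 1 + n + 1)).take m2)])
        · -- ordinary inline formula
          rw [if_neg hesc]
          have hstep := pvStep t fuel IH (p + 1 + n + 1) (by omega)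
          have hslice : PySem.List.slice t (some ((p + 1 : Nat) : Int)) (some ((p + 1 + n : Nat) : Int))
              = (t.drop (p + 1)).take n := by
            rw [PySem.List.slice_natCast]
            congr 1
            omega
          have hcast5 : (((p + 1 + n : Nat) : Int) + 1) = ((p + 1 + n + 1 : Nat) : Int) := by
            push_cast; ring
          simp only [hcast5, hslice]
          simpa [hesw, hesc, htake_ne, hidx]
            using hstep (formulas ++ [String.ofList ((t.drop (p + 1)).take n)])

-- ===== VERDICT (by name: the statement is the Claim_ definition above) =====
theorem formula_extr_spec : Claim_equal_formula_extr := by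
  intro text _
  unfold Spec_formula_extr formula_extr formula_extr_alt
  set t := text.toList with hdef
  by_cases h : PySem.Chars.find t ['$'] = -1
  · simp [h, pvBLoop_neg_one]
  · have hge : 0 ≤ PySem.Chars.find t ['$'] := by
      have := PySem.Chars.neg_one_le_find t ['$']; omega
    have hlt : -1 < PySem.Chars.find t ['$'] := by omega
    obtain ⟨hpre, -⟩ := PySem.Chars.find_spec hge
    set n := (PySem.Chars.find t ['$']).toNat with hn
    have hfind : PySem.Chars.find t ['$'] = (n : Int) := by omega
    rw [if_pos hlt, pvPartition_pos hfind]
    simp only [hfind]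
    simpa using pvLoop_eq t hlt (t.length + 1) n [] hpre
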